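-- pv_equiv track=rewrite | github.com/johnzhoudev/leetcode-practice | meta/Director of Photography (Chapter 1).py | solve
-- ===== SOURCE A (Python) =====
-- from collections import defaultdict
--
-- def solve(n, s, X, Y):
--
--   # Preprocess
--   photoToLeft = [0 for _ in range(len(s))]
--   backdropToLeft = [0 for _ in range(len(s))]
--   photoToRight = [0 for _ in range(len(s))]
--   backdropToRight = [0 for _ in range(len(s))]
--
--   counts = defaultdict(lambda : 0)
--   # left to right
--   for idx, c in enumerate(s):
--     counts[c] += 1
--     photoToLeft[idx] = counts['P']
--     backdropToLeft[idx] = counts['B']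
--
--   # backwards
--   counts.clear()
--   for i in range(len(s) - 1, -1, -1):
--     counts[s[i]] += 1
--     photoToRight[i] = counts['P']
--     backdropToRight[i] = counts['B']
--
--   # Now have preprocessed data, so count
--
--   totalWays = 0
--
--   # returns (photos to left, backdrop to left)
--   def getNumPhotoBackdropToLeft(leftIdx, largerLeftIdx):
--     if (leftIdx < 0): return (0, 0) # out of bounds
--     if (largerLeftIdx - 1 < 0): # to end
--       return (photoToLeft[leftIdx], backdropToLeft[leftIdx])
--     return (photoToLeft[leftIdx] - photoToLeft[largerLeftIdx - 1], backdropToLeft[leftIdx] - backdropToLeft[largerLeftIdx - 1])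
--
--   def getNumPhotoBackdropToRight(rightIdx, largerRightIdx):
--     if (rightIdx >= len(s)): return (0, 0) # out of bounds
--     if (largerRightIdx + 1 >= len(s)): # to end
--       return (photoToRight[rightIdx], backdropToRight[rightIdx])
--     return (photoToRight[rightIdx] - photoToRight[largerRightIdx + 1], backdropToRight[rightIdx] - backdropToRight[largerRightIdx + 1])
--
--   for actorIdx in range(len(s)):
--     if (s[actorIdx] != 'A'): continue
--
--     # x <= |b-a| <= Y
--     # so a + x is x distance away
--     # a + y is y distance away
--
--     leftIdx = actorIdx - X # could be < 0
--     largerLeftIdx = max(actorIdx - Y, 0) # take until 0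
--     rightIdx = actorIdx + X # could be >= len(s)
--     largerRightIdx = min(actorIdx + Y, len(s) - 1)
--
--
--     lPhotos, lBackdrop = getNumPhotoBackdropToLeft(leftIdx, largerLeftIdx)
--     rPhotos, rBackdrop = getNumPhotoBackdropToRight(rightIdx, largerRightIdx)
--
--
--     totalWays += lPhotos * rBackdrop
--     totalWays += rPhotos * lBackdrop
--
--   return totalWays
-- ===== SOURCE B (Python) =====
-- # Sliding-window re-implementation: no prefix arrays; maintains four running
-- # window counters updated in O(1) per actor index (every index access bounds-guarded).
-- def solve(n, s, X, Y):
--     m = len(s)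
--     if m == 0:
--         return 0
--     # counters for left window [a-Y, a-X] and right window [a+X, a+Y],
--     # clamped to [0, m-1], starting at a = 0
--     lp = lb = rp = rb = 0
--     if X == 0:
--         lp += 1 if s[0] == 'P' else 0
--         lb += 1 if s[0] == 'B' else 0
--     for j in range(max(X, 0), min(Y, m - 1) + 1):
--         rp += 1 if s[j] == 'P' else 0
--         rb += 1 if s[j] == 'B' else 0
--     total = 0
--     for a in range(m):
--         if a > 0:
--             e = a - X          # enters left window
--             if 0 <= e <= m - 1:
--                 lp += 1 if s[e] == 'P' else 0
--                 lb += 1 if s[e] == 'B' else 0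
--             q = a - 1 - Y      # leaves left window
--             if 0 <= q <= m - 1:
--                 lp -= 1 if s[q] == 'P' else 0
--                 lb -= 1 if s[q] == 'B' else 0
--             e = a + Y          # enters right window
--             if 0 <= e <= m - 1:
--                 rp += 1 if s[e] == 'P' else 0
--                 rb += 1 if s[e] == 'B' else 0
--             q = a - 1 + X      # leaves right window
--             if 0 <= q <= m - 1:
--                 rp -= 1 if s[q] == 'P' else 0
--                 rb -= 1 if s[q] == 'B' else 0
--         if s[a] == 'A':
--             total += lp * rb + rp * lb
--     return total
-- ===== Notes on version B (the rewrite author's own statement) =====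
-- stated objective: alternative
-- what changed: B replaces A's four prefix/suffix count arrays and the two difference helpers by a single left-to-right scan that maintains four sliding-window counters (photos/backdrops in the left and right distance windows), updating each in O(1) as the actor index advances.
-- outside the precondition, e.g. on solve(7, 'PPPAPPB', -2, 3): A returns 5, B returns 2; on solve(7, 'ABPABBB', 7, 1): A returns 0, B returns -1
import Mathlib
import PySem

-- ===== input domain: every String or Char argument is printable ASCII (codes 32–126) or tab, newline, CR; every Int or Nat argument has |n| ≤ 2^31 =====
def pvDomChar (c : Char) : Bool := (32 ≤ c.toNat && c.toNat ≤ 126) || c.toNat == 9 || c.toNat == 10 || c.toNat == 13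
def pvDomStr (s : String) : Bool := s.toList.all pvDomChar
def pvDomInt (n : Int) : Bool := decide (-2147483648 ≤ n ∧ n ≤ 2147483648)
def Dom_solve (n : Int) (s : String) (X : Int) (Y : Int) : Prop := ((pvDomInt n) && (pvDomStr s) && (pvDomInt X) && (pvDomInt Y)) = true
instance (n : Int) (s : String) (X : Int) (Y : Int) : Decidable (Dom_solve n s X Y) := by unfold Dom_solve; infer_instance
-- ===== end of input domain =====

-- One line: B drops A's four prefix/suffix arrays for four O(1)-updated sliding-window
-- counters maintained in a single scan (objective: alternative decomposition, same cost).

-- ===== PORT A =====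
-- forward pass: for idx, c in enumerate(s): counts[c] += 1; photoToLeft[idx] = counts['P']; backdropToLeft[idx] = counts['B']
-- (the arrays are written at idx = 0,1,2,… in order, so the transliteration appends)
def solveFwdStep (st : PySem.Dict Char Int × List Int × List Int) (c : Char) :
    PySem.Dict Char Int × List Int × List Int :=
  let counts := st.1.modify c 0 (· + 1)
  (counts, st.2.1 ++ [counts.getD 'P' 0], st.2.2 ++ [counts.getD 'B' 0])

-- backward pass: for i in range(len(s)-1, -1, -1): counts[s[i]] += 1; photoToRight[i] = counts['P']; …
-- visits s right-to-left (= foldr's innermost-first order) and writes at i = m-1,…,0, so it prepends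
def solveBwdStep (c : Char) (st : PySem.Dict Char Int × List Int × List Int) :
    PySem.Dict Char Int × List Int × List Int :=
  let counts := st.1.modify c 0 (· + 1)
  (counts, counts.getD 'P' 0 :: st.2.1, counts.getD 'B' 0 :: st.2.2)

-- getNumPhotoBackdropToLeft; pyGetD's default is unreachable: all indices are in range under Pre_solve
def solveGetLeft (pl bl : List Int) (leftIdx largerLeftIdx : Int) : Int × Int :=
  if leftIdx < 0 then (0, 0)
  else if largerLeftIdx - 1 < 0 then
    (PySem.List.pyGetD pl leftIdx 0, PySem.List.pyGetD bl leftIdx 0)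
  else
    (PySem.List.pyGetD pl leftIdx 0 - PySem.List.pyGetD pl (largerLeftIdx - 1) 0,
     PySem.List.pyGetD bl leftIdx 0 - PySem.List.pyGetD bl (largerLeftIdx - 1) 0)

-- getNumPhotoBackdropToRight
def solveGetRight (m : Int) (pr br : List Int) (rightIdx largerRightIdx : Int) : Int × Int :=
  if m ≤ rightIdx then (0, 0)
  else if m ≤ largerRightIdx + 1 then
    (PySem.List.pyGetD pr rightIdx 0, PySem.List.pyGetD br rightIdx 0)
  else
    (PySem.List.pyGetD pr rightIdx 0 - PySem.List.pyGetD pr (largerRightIdx + 1) 0,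
     PySem.List.pyGetD br rightIdx 0 - PySem.List.pyGetD br (largerRightIdx + 1) 0)

def solve (n : Int) (s : String) (X : Int) (Y : Int) : Int :=
  let l := s.toList
  let m : Int := PySem.List.len l
  let fwd := l.foldl solveFwdStep (PySem.Dict.empty, [], [])
  let pl := fwd.2.1
  let bl := fwd.2.2
  let bwd := l.foldr solveBwdStep (PySem.Dict.empty, [], [])
  let pr := bwd.2.1
  let br := bwd.2.2
  (PySem.List.pyRange 0 m 1).foldl (fun totalWays a =>
    if PySem.List.pyGetD l a ' ' ≠ 'A' then totalWays
    else
      let leftIdx := a - X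
      let largerLeftIdx := max (a - Y) 0
      let rightIdx := a + X
      let largerRightIdx := min (a + Y) (m - 1)
      let lpb := solveGetLeft pl bl leftIdx largerLeftIdx
      let rpb := solveGetRight m pr br rightIdx largerRightIdx
      totalWays + lpb.1 * rpb.2 + rpb.1 * lpb.2) 0

-- ===== PORT B =====
-- '1 if s[j] == c else 0' (indices in range under Pre_solve; pyGetD's default ' ' is never 'P'/'B'/'A')
def altInd (l : List Char) (c : Char) (j : Int) : Int :=
  if PySem.List.pyGetD l j ' ' = c then 1 else 0

-- body of the single scan: shift the four window counters (each 'if guard: c += …'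
-- line of Source B is one guarded update), then add the actor term
def altStep (l : List Char) (m X Y : Int) (st : Int × Int × Int × Int × Int) (a : Int) :
    Int × Int × Int × Int × Int :=
  let w : Int × Int × Int × Int :=
    if 0 < a then
      let lp := if 0 ≤ a - X ∧ a - X ≤ m - 1 then st.1 + altInd l 'P' (a - X) else st.1
      let lb := if 0 ≤ a - X ∧ a - X ≤ m - 1 then st.2.1 + altInd l 'B' (a - X) else st.2.1
      let lp := if 0 ≤ a - 1 - Y ∧ a - 1 - Y ≤ m - 1 then lp - altInd l 'P' (a - 1 - Y) else lp
      let lb := if 0 ≤ a - 1 - Y ∧ a - 1 - Y ≤ m - 1 then lb - altInd l 'B' (a - 1 - Y) else lb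
      let rp := if 0 ≤ a + Y ∧ a + Y ≤ m - 1 then st.2.2.1 + altInd l 'P' (a + Y) else st.2.2.1
      let rb := if 0 ≤ a + Y ∧ a + Y ≤ m - 1 then st.2.2.2.1 + altInd l 'B' (a + Y) else st.2.2.2.1
      let rp := if 0 ≤ a - 1 + X ∧ a - 1 + X ≤ m - 1 then rp - altInd l 'P' (a - 1 + X) else rp
      let rb := if 0 ≤ a - 1 + X ∧ a - 1 + X ≤ m - 1 then rb - altInd l 'B' (a - 1 + X) else rb
      (lp, lb, rp, rb)
    else (st.1, st.2.1, st.2.2.1, st.2.2.2.1)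
  let total := if PySem.List.pyGetD l a ' ' = 'A'
    then st.2.2.2.2 + w.1 * w.2.2.2 + w.2.2.1 * w.2.1 else st.2.2.2.2
  (w.1, w.2.1, w.2.2.1, w.2.2.2, total)

def solve_alt (n : Int) (s : String) (X : Int) (Y : Int) : Int :=
  let l := s.toList
  let m : Int := PySem.List.len l
  if m = 0 then 0
  else
    let lp0 : Int := if X = 0 then altInd l 'P' 0 else 0
    let lb0 : Int := if X = 0 then altInd l 'B' 0 else 0
    let r0 : Int × Int :=
      (PySem.List.pyRange (max X 0) (min Y (m - 1) + 1) 1).foldl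
        (fun rc j => (rc.1 + altInd l 'P' j, rc.2 + altInd l 'B' j)) (0, 0)
    let res := (PySem.List.pyRange 0 m 1).foldl (altStep l m X Y) (lp0, lb0, r0.1, r0.2, 0)
    res.2.2.2.2

-- ===== PRECONDITION & SPEC =====
-- Pre_ admits sensible distance ranges 0 ≤ X ≤ Y and, for arbitrary X Y, actor-free strings
-- (both programs return 0); it excludes X < 0 (A indexes its arrays out of range: IndexError, or
-- accidental values via negative-index wraparound) and X > Y with an actor present (inverted
-- distance range, where A's prefix differences return accidental negative counts).
def Pre_solve (n : Int) (s : String) (X : Int) (Y : Int) : Prop :=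
  (0 ≤ X ∧ X ≤ Y) ∨ 'A' ∉ s.toList
instance (n : Int) (s : String) (X : Int) (Y : Int) : Decidable (Pre_solve n s X Y) := by
  unfold Pre_solve; infer_instance

def pvWitness_solve : Int × String × Int × Int := (3, "APB", 0, 2)

def Spec_solve (n : Int) (s : String) (X : Int) (Y : Int) (out : Int) : Prop := out = solve_alt n s X Y
instance (n : Int) (s : String) (X : Int) (Y : Int) (out : Int) : Decidable (Spec_solve n s X Y out) := by
  unfold Spec_solve; infer_instance

-- ===== CLAIM (what is proved, stated in full; the proofs are below) =====
def Claim_equal_solve : Prop := ∀ (n : Int) (s : String) (X : Int) (Y : Int),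
  Dom_solve n s X Y → Pre_solve n s X Y → Spec_solve n s X Y (solve n s X Y)

-- ===== LEMMAS AND PROOFS =====

-- number of occurrences of c among the first k characters (clamped), as an Int
def cnt (l : List Char) (c : Char) (k : Int) : Int := ((l.take k.toNat).count c : Int)

-- count of c at indices in [lo, hi] ∩ [0, l.length)  (for lo ≤ hi + 1)
def icnt (l : List Char) (c : Char) (lo hi : Int) : Int := cnt l c (hi + 1) - cnt l c lo

-- the common specification: the contribution of actor position a
def wTerm (l : List Char) (X Y a : Int) : Int :=
  icnt l 'P' (a - Y) (a - X) * icnt l 'B' (a + X) (a + Y) +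
  icnt l 'P' (a + X) (a + Y) * icnt l 'B' (a - Y) (a - X)

def specTerm (l : List Char) (X Y a : Int) : Int :=
  if l[a.toNat]? = some 'A' then wTerm l X Y a else 0

def specSum (l : List Char) (X Y : Int) : Int :=
  ((PySem.List.pyRange 0 (l.length : Int) 1).map (specTerm l X Y)).sum

lemma cnt_nonpos (l : List Char) (c : Char) (k : Int) (h : k ≤ 0) : cnt l c k = 0 := by
  simp [cnt, Int.toNat_of_nonpos h]

lemma cnt_ge (l : List Char) (c : Char) (k : Int) (h : (l.length : Int) ≤ k) :
    cnt l c k = (l.count c : Int) := by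
  have : l.length ≤ k.toNat := by omega
  simp [cnt, List.take_of_length_le this]

lemma cnt_succ (l : List Char) (c : Char) (k : Int) (hk : 0 ≤ k) :
    cnt l c (k + 1) = cnt l c k + (if l[k.toNat]? = some c then 1 else 0) := by
  have h1 : (k + 1).toNat = k.toNat + 1 := by omega
  by_cases h : k.toNat < l.length
  · have h4 : l.take (k.toNat + 1) = l.take k.toNat ++ [l[k.toNat]] := by
      rw [List.take_add_one, List.getElem?_eq_getElem h]; rfl
    rw [cnt, cnt, h1, h4, List.count_append, List.getElem?_eq_getElem h, List.count_singleton]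
    by_cases hc : l[k.toNat] = c <;> simp [hc]
  · have h2 : l.length ≤ k.toNat := by omega
    have h3 : l[k.toNat]? = none := by simp; omega
    rw [cnt, cnt, h1, List.take_of_length_le h2, List.take_of_length_le (by omega : l.length ≤ k.toNat + 1), h3]
    simp

lemma altInd_eq (l : List Char) (c : Char) (j : Int) (hj : 0 ≤ j) (hc : c ≠ ' ') :
    altInd l c j = cnt l c (j + 1) - cnt l c j := by
  rw [cnt_succ l c j hj]
  simp only [altInd, PySem.List.pyGetD, PySem.List.pyGet?_of_nonneg l hj]
  by_cases h : j.toNat < l.length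
  · simp [List.getElem?_eq_getElem h]
  · have h3 : l[j.toNat]? = none := by simp; omega
    simp [h3, Option.getD, Ne.symm hc]

-- ----- A side: characterisation of the four arrays -----

lemma fwd_arrays (xs : List Char) : ∀ (d : PySem.Dict Char Int) (pl bl : List Int) (v : Char → Int),
    (∀ ch, d.getD ch 0 = v ch) →
    (xs.foldl solveFwdStep (d, pl, bl)).2.1
        = pl ++ (List.range xs.length).map (fun i => v 'P' + ((xs.take (i + 1)).count 'P' : Int))
    ∧ (xs.foldl solveFwdStep (d, pl, bl)).2.2
        = bl ++ (List.range xs.length).map (fun i => v 'B' + ((xs.take (i + 1)).count 'B' : Int)) := by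
  induction xs with
  | nil => intro d pl bl v hv; simp
  | cons c xs ih =>
    intro d pl bl v hv
    have hv' : ∀ ch, (d.modify c 0 (· + 1)).getD ch 0 = v ch + (if ch = c then 1 else 0) := by
      intro ch
      rw [PySem.Dict.getD_modify]
      by_cases h : ch = c <;> simp [h, hv]
    have key := ih (d.modify c 0 (· + 1))
      (pl ++ [(d.modify c 0 (· + 1)).getD 'P' 0]) (bl ++ [(d.modify c 0 (· + 1)).getD 'B' 0])
      (fun ch => v ch + (if ch = c then 1 else 0)) hv'
    simp only [List.foldl_cons, solveFwdStep] at key ⊢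
    rw [key.1, key.2]
    constructor <;>
    · rw [List.length_cons, List.range_succ_eq_map, List.map_cons, List.map_map, List.append_assoc]
      congr 1
      rw [List.singleton_append]
      congr 1
      · rw [hv']
        simp only [List.take_succ_cons, List.take_zero, List.count_cons, List.count_nil]
        split_ifs with h1 h2 h2
        all_goals clear ih hv hv' key
        all_goals first
          | (push_cast; omega)
          | (exfalso; simp only [beq_iff_eq] at h2 ⊢; exact h2 h1.symm)
          | (exfalso; exact h1 (beq_iff_eq.mp h2).symm)
      · apply List.map_congr_left
        intro i _
        simp only [Function.comp]
        rw [List.take_succ_cons, List.count_cons]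
        split_ifs with h1 h2 h2
        all_goals clear ih hv hv' key
        all_goals first
          | (push_cast; omega)
          | (exfalso; simp only [beq_iff_eq] at h2 ⊢; exact h2 h1.symm)
          | (exfalso; exact h1 (beq_iff_eq.mp h2).symm)

lemma bwd_arrays (xs : List Char) :
    (∀ ch, (xs.foldr solveBwdStep (PySem.Dict.empty, [], [])).1.getD ch 0 = (xs.count ch : Int))
    ∧ (xs.foldr solveBwdStep (PySem.Dict.empty, [], [])).2.1
        = (List.range xs.length).map (fun i => ((xs.drop i).count 'P' : Int))
    ∧ (xs.foldr solveBwdStep (PySem.Dict.empty, [], [])).2.2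
        = (List.range xs.length).map (fun i => ((xs.drop i).count 'B' : Int)) := by
  induction xs with
  | nil => simp [PySem.Dict.getD_empty]
  | cons c xs ih =>
    obtain ⟨hd, hp, hb⟩ := ih
    simp only [List.foldr_cons, solveBwdStep]
    have hd' : ∀ ch, ((xs.foldr solveBwdStep (PySem.Dict.empty, [], [])).1.modify c 0 (· + 1)).getD ch 0
        = ((c :: xs).count ch : Int) := by
      intro ch
      rw [PySem.Dict.getD_modify]
      rw [List.count_cons]
      by_cases h : ch = c
      · rw [if_pos h, h, hd]
        have hb2 : (c == c) = true := by simp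
        rw [if_pos hb2]
        push_cast; ring
      · rw [if_neg h, hd]
        have hb2 : ¬(c == ch) = true := by simp only [beq_iff_eq]; exact fun hh => h hh.symm
        rw [if_neg hb2]
        push_cast; ring
    refine ⟨hd', ?_, ?_⟩ <;>
    · rw [List.length_cons, List.range_succ_eq_map]
      simp [hd', hp, hb, List.map_map, Function.comp]

-- ----- shared per-index arithmetic -----

lemma icnt_left_zero (l : List Char) (c : Char) (X Y a : Int) (hXY : X ≤ Y) (h : a - X < 0) :
    icnt l c (a - Y) (a - X) = 0 := by
  rw [icnt, cnt_nonpos l c (a - X + 1) (by omega), cnt_nonpos l c (a - Y) (by omega)]; ring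

lemma icnt_right_zero (l : List Char) (c : Char) (X Y a : Int) (hXY : X ≤ Y)
    (h : (l.length : Int) ≤ a + X) : icnt l c (a + X) (a + Y) = 0 := by
  rw [icnt, cnt_ge l c (a + Y + 1) (by omega), cnt_ge l c (a + X) h]; ring

-- ----- B side: the window invariant -----

lemma init_right (l : List Char) (c : Char) (hc : c ≠ ' ') :
    ∀ (k : Nat) (lo : Int), 0 ≤ lo → ∀ (p : Int),
    ((PySem.List.pyRange lo (lo + k) 1).foldl (fun acc j => acc + altInd l c j) p)
      = p + cnt l c (lo + k) - cnt l c lo := by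
  intro k
  induction k with
  | zero => intro lo hlo p; simp [PySem.List.pyRange_one_eq_nil (by omega : lo + (0:Nat) ≤ lo)]
  | succ k ih =>
    intro lo hlo p
    have h1 : lo + ((k : Nat) + 1 : Nat) = (lo + k) + 1 := by push_cast; ring
    rw [h1, PySem.List.pyRange_one_succ_right (by omega), List.foldl_append]
    simp only [List.foldl_cons, List.foldl_nil]
    rw [ih lo hlo p, altInd_eq l c (lo + k) (by omega) hc]
    ring

lemma shift_left (l : List Char) (c : Char) (hc : c ≠ ' ') (X Y a : Int)
    (hX : 0 ≤ X) (hXY : X ≤ Y) (ha : 1 ≤ a) (ham : a ≤ (l.length : Int) - 1) :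
    (icnt l c (a - 1 - Y) (a - 1 - X)
      + (if 0 ≤ a - X ∧ a - X ≤ (l.length : Int) - 1 then altInd l c (a - X) else 0))
      - (if 0 ≤ a - 1 - Y ∧ a - 1 - Y ≤ (l.length : Int) - 1 then altInd l c (a - 1 - Y) else 0)
    = icnt l c (a - Y) (a - X) := by
  simp only [icnt]
  have e1 : a - 1 - X + 1 = a - X := by ring
  rw [e1]
  by_cases h1 : 0 ≤ a - X
  · rw [if_pos ⟨h1, by omega⟩, altInd_eq l c (a - X) h1 hc]
    by_cases h2 : 0 ≤ a - 1 - Y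
    · rw [if_pos ⟨h2, by omega⟩, altInd_eq l c (a - 1 - Y) h2 hc]
      have e2 : a - 1 - Y + 1 = a - Y := by ring
      rw [e2]; ring
    · rw [if_neg (by omega)]
      rw [cnt_nonpos l c (a - 1 - Y) (by omega), cnt_nonpos l c (a - Y) (by omega)]
      ring
  · rw [if_neg (by omega), if_neg (by omega)]
    rw [cnt_nonpos l c (a - X) (by omega), cnt_nonpos l c (a - X + 1) (by omega),
        cnt_nonpos l c (a - 1 - Y) (by omega), cnt_nonpos l c (a - Y) (by omega)]
    ring

lemma shift_right (l : List Char) (c : Char) (hc : c ≠ ' ') (X Y a : Int)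
    (hX : 0 ≤ X) (hXY : X ≤ Y) (ha : 1 ≤ a) :
    (icnt l c (a - 1 + X) (a - 1 + Y)
      + (if 0 ≤ a + Y ∧ a + Y ≤ (l.length : Int) - 1 then altInd l c (a + Y) else 0))
      - (if 0 ≤ a - 1 + X ∧ a - 1 + X ≤ (l.length : Int) - 1 then altInd l c (a - 1 + X) else 0)
    = icnt l c (a + X) (a + Y) := by
  simp only [icnt]
  have e1 : a - 1 + Y + 1 = a + Y := by ring
  have e2 : a - 1 + X + 1 = a + X := by ring
  rw [e1]
  by_cases h1 : a + Y ≤ (l.length : Int) - 1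
  · rw [if_pos ⟨by omega, h1⟩, altInd_eq l c (a + Y) (by omega) hc]
    have h2 : a - 1 + X ≤ (l.length : Int) - 1 := by omega
    rw [if_pos ⟨by omega, h2⟩, altInd_eq l c (a - 1 + X) (by omega) hc, e2]
    ring
  · rw [if_neg (fun h => h1 h.2)]
    by_cases h2 : a - 1 + X ≤ (l.length : Int) - 1
    · rw [if_pos ⟨by omega, h2⟩, altInd_eq l c (a - 1 + X) (by omega) hc, e2]
      rw [cnt_ge l c (a + Y) (by omega), cnt_ge l c (a + Y + 1) (by omega)]
      ring
    · rw [if_neg (fun h => h2 h.2)]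
      rw [cnt_ge l c (a + Y) (by omega), cnt_ge l c (a + Y + 1) (by omega),
          cnt_ge l c (a - 1 + X) (by omega), cnt_ge l c (a + X) (by omega)]
      ring

lemma pyGetD_char_eq (l : List Char) (a : Int) (h0 : 0 ≤ a) (hm : a < (l.length : Int)) (c : Char) :
    (PySem.List.pyGetD l a ' ' = c) ↔ (l[a.toNat]? = some c) := by
  have hlt : a.toNat < l.length := by omega
  rw [PySem.List.pyGetD_eq_getElem l ' ' h0 hm]
  simp [List.getElem?_eq_getElem hlt]

lemma alt_main (l : List Char) (X Y : Int) (hX : 0 ≤ X) (hXY : X ≤ Y) :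
    ∀ (k : Nat) (a : Int), 1 ≤ a → a + k = (l.length : Int) →
    ∀ (lp lb rp rb t : Int),
    lp = icnt l 'P' (a - 1 - Y) (a - 1 - X) → lb = icnt l 'B' (a - 1 - Y) (a - 1 - X) →
    rp = icnt l 'P' (a - 1 + X) (a - 1 + Y) → rb = icnt l 'B' (a - 1 + X) (a - 1 + Y) →
    ((PySem.List.pyRange a (l.length : Int) 1).foldl (altStep l (l.length : Int) X Y)
        (lp, lb, rp, rb, t)).2.2.2.2
      = t + ((PySem.List.pyRange a (l.length : Int) 1).map (specTerm l X Y)).sum := by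
  intro k
  induction k with
  | zero =>
    intro a ha hm lp lb rp rb t _ _ _ _
    rw [PySem.List.pyRange_one_eq_nil (by omega)]
    simp
  | succ k ih =>
    intro a ha hm lp lb rp rb t hlp hlb hrp hrb
    rw [PySem.List.pyRange_one_cons (by omega : a < (l.length : Int))]
    simp only [List.foldl_cons, List.map_cons, List.sum_cons]
    have hconvA : ∀ (x i : Int) (g : Prop) (_ : Decidable g),
        (if g then x + i else x) = x + (if g then i else 0) := by
      intros x i g hg; split <;> simp
    have hconvS : ∀ (x i : Int) (g : Prop) (_ : Decidable g),
        (if g then x - i else x) = x - (if g then i else 0) := by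
      intros x i g hg; split <;> simp
    have hstep : altStep l (l.length : Int) X Y (lp, lb, rp, rb, t) a
        = (icnt l 'P' (a - Y) (a - X), icnt l 'B' (a - Y) (a - X),
           icnt l 'P' (a + X) (a + Y), icnt l 'B' (a + X) (a + Y),
           t + specTerm l X Y a) := by
      have l1 := shift_left l 'P' (by decide) X Y a hX hXY ha (by omega)
      have l2 := shift_left l 'B' (by decide) X Y a hX hXY ha (by omega)
      have r1 := shift_right l 'P' (by decide) X Y a hX hXY ha
      have r2 := shift_right l 'B' (by decide) X Y a hX hXY ha
      simp only [altStep, if_pos (show (0:Int) < a by omega)]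
      simp only [hconvA, hconvS]
      rw [hlp, hlb, hrp, hrb]
      rw [l1, l2, r1, r2]
      simp only [specTerm, wTerm]
      by_cases hA : PySem.List.pyGetD l a ' ' = 'A'
      · rw [if_pos hA, if_pos ((pyGetD_char_eq l a (by omega) (by omega) 'A').mp hA)]
        simp only [Prod.mk.injEq]
        exact ⟨trivial, trivial, trivial, trivial, by ring⟩
      · rw [if_neg hA, if_neg (fun hh => hA ((pyGetD_char_eq l a (by omega) (by omega) 'A').mpr hh))]
        simp only [Prod.mk.injEq]
        exact ⟨trivial, trivial, trivial, trivial, by ring⟩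
    rw [hstep]
    rw [ih (a + 1) (by omega) (by omega) _ _ _ _ _
        (by rw [show a + 1 - 1 - Y = a - Y by ring, show a + 1 - 1 - X = a - X by ring])
        (by rw [show a + 1 - 1 - Y = a - Y by ring, show a + 1 - 1 - X = a - X by ring])
        (by rw [show a + 1 - 1 + X = a + X by ring, show a + 1 - 1 + Y = a + Y by ring])
        (by rw [show a + 1 - 1 + X = a + X by ring, show a + 1 - 1 + Y = a + Y by ring])]
    ring

lemma cnt_drop (l : List Char) (c : Char) (i : Int) (h0 : 0 ≤ i) :
    ((l.drop i.toNat).count c : Int) = (l.count c : Int) - cnt l c i := by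
  have h : (l.count c : Int) = ((l.take i.toNat).count c : Int) + ((l.drop i.toNat).count c : Int) := by
    rw [← Nat.cast_add, ← List.count_append, List.take_append_drop]
  rw [cnt]; omega

lemma index_map_range (l : List Char) (f : Nat → Int) (i : Int) (h0 : 0 ≤ i)
    (hm : i < (l.length : Int)) :
    PySem.List.pyGetD ((List.range l.length).map f) i 0 = f i.toNat := by
  have hlt : i.toNat < l.length := by omega
  rw [PySem.List.pyGetD_eq_getElem _ 0 h0 (by simp; omega)]
  simp

lemma getLeft_eq (l : List Char) (X Y a : Int) (hX : 0 ≤ X) (hXY : X ≤ Y)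
    (h0 : 0 ≤ a) (hm : a < (l.length : Int)) :
    solveGetLeft ((List.range l.length).map (fun i => ((l.take (i + 1)).count 'P' : Int)))
                 ((List.range l.length).map (fun i => ((l.take (i + 1)).count 'B' : Int)))
                 (a - X) (max (a - Y) 0)
      = (icnt l 'P' (a - Y) (a - X), icnt l 'B' (a - Y) (a - X)) := by
  rw [solveGetLeft]
  by_cases h1 : a - X < 0
  · rw [if_pos h1, icnt_left_zero l 'P' X Y a hXY h1, icnt_left_zero l 'B' X Y a hXY h1]
  · rw [if_neg h1]
    have hax0 : 0 ≤ a - X := by omega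
    have haxm : a - X < (l.length : Int) := by omega
    have hidx : ∀ c : Char, ((l.take ((a - X).toNat + 1)).count c : Int) = cnt l c (a - X + 1) := by
      intro c
      have e : (a - X + 1).toNat = (a - X).toNat + 1 := by omega
      rw [cnt, e]
    by_cases h2 : max (a - Y) 0 - 1 < 0
    · rw [if_pos h2]
      rw [index_map_range l _ (a - X) hax0 haxm, index_map_range l _ (a - X) hax0 haxm]
      have hay : a - Y ≤ 0 := by
        rcases max_choice (a - Y) 0 with h | h <;> rw [h] at h2 <;> omega
      rw [icnt, icnt, cnt_nonpos l 'P' (a - Y) hay, cnt_nonpos l 'B' (a - Y) hay]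
      rw [hidx 'P', hidx 'B']
      simp
    · rw [if_neg h2]
      have hay : 0 < a - Y := by
        rcases max_choice (a - Y) 0 with h | h <;> rw [h] at h2 <;> omega
      have hmax : max (a - Y) 0 = a - Y := by omega
      rw [hmax]
      have hay0 : 0 ≤ a - Y - 1 := by omega
      have haym : a - Y - 1 < (l.length : Int) := by omega
      rw [index_map_range l _ (a - X) hax0 haxm, index_map_range l _ (a - X) hax0 haxm,
          index_map_range l _ (a - Y - 1) hay0 haym, index_map_range l _ (a - Y - 1) hay0 haym]
      have hidx2 : ∀ c : Char, ((l.take ((a - Y - 1).toNat + 1)).count c : Int) = cnt l c (a - Y) := by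
        intro c
        have e : (a - Y).toNat = (a - Y - 1).toNat + 1 := by omega
        rw [cnt, e]
      rw [hidx 'P', hidx 'B', hidx2 'P', hidx2 'B', icnt, icnt]

lemma getRight_eq (l : List Char) (X Y a : Int) (hX : 0 ≤ X) (hXY : X ≤ Y)
    (h0 : 0 ≤ a) (hm : a < (l.length : Int)) :
    solveGetRight (l.length : Int)
                 ((List.range l.length).map (fun i => ((l.drop i).count 'P' : Int)))
                 ((List.range l.length).map (fun i => ((l.drop i).count 'B' : Int)))
                 (a + X) (min (a + Y) ((l.length : Int) - 1))
      = (icnt l 'P' (a + X) (a + Y), icnt l 'B' (a + X) (a + Y)) := by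
  rw [solveGetRight]
  by_cases h1 : (l.length : Int) ≤ a + X
  · rw [if_pos h1, icnt_right_zero l 'P' X Y a hXY h1, icnt_right_zero l 'B' X Y a hXY h1]
  · rw [if_neg h1]
    have hax0 : 0 ≤ a + X := by omega
    have haxm : a + X < (l.length : Int) := by omega
    have hidx : ∀ c : Char, ((l.drop (a + X).toNat).count c : Int) = (l.count c : Int) - cnt l c (a + X) :=
      fun c => cnt_drop l c (a + X) hax0
    by_cases h2 : (l.length : Int) ≤ min (a + Y) ((l.length : Int) - 1) + 1
    · rw [if_pos h2]
      rw [index_map_range l _ (a + X) hax0 haxm, index_map_range l _ (a + X) hax0 haxm]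
      have hay : (l.length : Int) ≤ a + Y + 1 := by
        rcases min_choice (a + Y) ((l.length : Int) - 1) with h | h <;> rw [h] at h2 <;> omega
      rw [icnt, icnt, cnt_ge l 'P' (a + Y + 1) hay, cnt_ge l 'B' (a + Y + 1) hay]
      rw [hidx 'P', hidx 'B']
    · rw [if_neg h2]
      have hay : a + Y < (l.length : Int) - 1 := by
        rcases min_choice (a + Y) ((l.length : Int) - 1) with h | h <;> rw [h] at h2 <;> omega
      have hmin : min (a + Y) ((l.length : Int) - 1) = a + Y := by omega
      rw [hmin]
      have hay0 : 0 ≤ a + Y + 1 := by omega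
      have haym : a + Y + 1 < (l.length : Int) := by omega
      rw [index_map_range l _ (a + X) hax0 haxm, index_map_range l _ (a + X) hax0 haxm,
          index_map_range l _ (a + Y + 1) hay0 haym, index_map_range l _ (a + Y + 1) hay0 haym]
      rw [hidx 'P', hidx 'B', cnt_drop l 'P' (a + Y + 1) hay0, cnt_drop l 'B' (a + Y + 1) hay0,
          icnt, icnt]
      simp only [Prod.mk.injEq]
      constructor <;> ring

lemma a_eq_spec (n : Int) (s : String) (X Y : Int) (hX : 0 ≤ X) (hXY : X ≤ Y) :
    solve n s X Y = specSum s.toList X Y := by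
  have hfwd := fwd_arrays s.toList PySem.Dict.empty [] [] (fun _ => 0)
    (by intro ch; simp [PySem.Dict.getD_empty])
  have hbwd := bwd_arrays s.toList
  simp only [solve, PySem.List.len_eq]
  rw [hfwd.1, hfwd.2, hbwd.2.1, hbwd.2.2]
  simp only [List.nil_append, zero_add]
  refine Eq.trans (PySem.List.foldl_congr_mem _ _
      (fun t a => t + specTerm s.toList X Y a) 0 ?_) ?_
  · intro t a ha
    rw [PySem.List.mem_pyRange_one] at ha
    by_cases hA : PySem.List.pyGetD s.toList a ' ' = 'A'
    · rw [if_neg (by simpa using hA)]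
      simp only [specTerm]
      rw [if_pos ((pyGetD_char_eq s.toList a ha.1 ha.2 'A').mp hA)]
      rw [getLeft_eq s.toList X Y a hX hXY ha.1 ha.2, getRight_eq s.toList X Y a hX hXY ha.1 ha.2]
      rw [wTerm]; ring
    · rw [if_pos (by simpa using hA)]
      simp only [specTerm]
      rw [if_neg (fun hh => hA ((pyGetD_char_eq s.toList a ha.1 ha.2 'A').mpr hh))]
      ring
  · rw [PySem.List.foldl_add]
    simp [specSum]

lemma alt_eq_spec (n : Int) (s : String) (X Y : Int) (hX : 0 ≤ X) (hXY : X ≤ Y) :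
    solve_alt n s X Y = specSum s.toList X Y := by
  simp only [solve_alt, PySem.List.len_eq]
  by_cases hm : (s.toList.length : Int) = 0
  · rw [if_pos hm]
    rw [specSum, hm, PySem.List.pyRange_one_eq_nil (by omega)]
    simp
  · rw [if_neg hm]
    have hm1 : 1 ≤ (s.toList.length : Int) := by
      have := Int.natCast_nonneg s.toList.length; omega
    set l := s.toList with hls
    -- initial left counters
    have hlp0 : ∀ c : Char, c ≠ ' ' →
        (if X = 0 then altInd l c 0 else 0) = icnt l c (0 - Y) (0 - X) := by
      intro c hc
      by_cases hx : X = 0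
      · subst hx
        rw [if_pos rfl, icnt, altInd_eq l c 0 le_rfl hc,
            cnt_nonpos l c 0 le_rfl, cnt_nonpos l c (0 - Y) (by omega)]
        norm_num
      · rw [if_neg hx, icnt, cnt_nonpos l c (0 - X + 1) (by omega),
            cnt_nonpos l c (0 - Y) (by omega)]
        ring
    -- initial right counters
    have hmx : max X 0 = X := by omega
    have hr0 : ∀ c : Char, c ≠ ' ' →
        ((PySem.List.pyRange X (min Y ((l.length : Int) - 1) + 1) 1).foldl
          (fun acc j => acc + altInd l c j) 0) = icnt l c (0 + X) (0 + Y) := by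
      intro c hc
      by_cases hle : X ≤ min Y ((l.length : Int) - 1) + 1
      · have hk : X + ((min Y ((l.length : Int) - 1) + 1 - X).toNat : Int)
            = min Y ((l.length : Int) - 1) + 1 := by omega
        rw [← hk, init_right l c hc _ X hX 0]
        rw [hk, icnt]
        by_cases hy : Y ≤ (l.length : Int) - 1
        · have : min Y ((l.length : Int) - 1) = Y := by omega
          rw [this]
          have e : Y + 1 = 0 + Y + 1 := by ring
          have e2 : X = 0 + X := by ring
          rw [← e, ← e2]
          ring
        · have : min Y ((l.length : Int) - 1) = (l.length : Int) - 1 := by omega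
          rw [this]
          rw [show (l.length : Int) - 1 + 1 = (l.length : Int) by ring]
          rw [cnt_ge l c (l.length : Int) le_rfl, cnt_ge l c (0 + Y + 1) (by omega),
              show (0 : Int) + X = X by ring]
          ring
      · rw [PySem.List.pyRange_one_eq_nil (by omega)]
        have hxm : (l.length : Int) ≤ 0 + X := by omega
        rw [List.foldl_nil, icnt_right_zero l c X Y 0 hXY hxm]
    -- split the paired initialisation fold and rewrite all four initial counters
    rw [hmx]
    rw [PySem.List.foldl_prod_mk (f := fun acc j => acc + altInd l 'P' j)
        (g := fun acc j => acc + altInd l 'B' j)]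
    rw [hlp0 'P' (by decide), hlp0 'B' (by decide)]
    simp only [Prod.fst, Prod.snd]
    rw [hr0 'P' (by decide), hr0 'B' (by decide)]
    have h0lt : (0 : Int) < (l.length : Int) := by omega
    rw [PySem.List.pyRange_one_cons h0lt, List.foldl_cons]
    -- the first iteration (a = 0) leaves the counters unchanged and adds specTerm 0
    have hstep0 : altStep l (l.length : Int) X Y
        (icnt l 'P' (0 - Y) (0 - X), icnt l 'B' (0 - Y) (0 - X),
         icnt l 'P' (0 + X) (0 + Y), icnt l 'B' (0 + X) (0 + Y), 0) 0
        = (icnt l 'P' (0 - Y) (0 - X), icnt l 'B' (0 - Y) (0 - X),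
           icnt l 'P' (0 + X) (0 + Y), icnt l 'B' (0 + X) (0 + Y), specTerm l X Y 0) := by
      simp only [altStep, if_neg (lt_irrefl (0 : Int))]
      simp only [specTerm, wTerm]
      by_cases hA : PySem.List.pyGetD l 0 ' ' = 'A'
      · rw [if_pos hA, if_pos ((pyGetD_char_eq l 0 le_rfl h0lt 'A').mp hA)]
        simp only [Prod.mk.injEq]
        exact ⟨trivial, trivial, trivial, trivial, by ring⟩
      · rw [if_neg hA, if_neg (fun hh => hA ((pyGetD_char_eq l 0 le_rfl h0lt 'A').mpr hh))]
    rw [hstep0]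
    simp only [zero_add]
    -- the remaining iterations via the window invariant
    rw [alt_main l X Y hX hXY (((l.length : Int) - 1).toNat) 1 le_rfl (by omega) _ _ _ _ _
        (by congr 1 <;> ring) (by congr 1 <;> ring) (by congr 1 <;> ring) (by congr 1 <;> ring)]
    rw [specSum, PySem.List.pyRange_one_cons h0lt]
    simp
lemma a_noA (n : Int) (s : String) (X Y : Int) (hA : 'A' ∉ s.toList) :
    solve n s X Y = 0 := by
  simp only [solve, PySem.List.len_eq]
  refine Eq.trans (PySem.List.foldl_congr_mem _ _ (fun t _ => t) 0 ?_)
    (PySem.List.foldl_ignore _ _)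
  intro t a ha
  rw [PySem.List.mem_pyRange_one] at ha
  rw [if_pos]
  intro hh
  exact hA (List.mem_of_getElem? (((pyGetD_char_eq s.toList a ha.1 ha.2 'A').mp (by simpa using hh))))

lemma alt_total_const (l : List Char) (m X Y : Int) :
    ∀ (zs : List Int), (∀ a ∈ zs, PySem.List.pyGetD l a ' ' ≠ 'A') →
    ∀ (st : Int × Int × Int × Int × Int),
      ((zs.foldl (altStep l m X Y) st).2.2.2.2 = st.2.2.2.2) := by
  intro zs
  induction zs with
  | nil => intro _ st; rfl
  | cons z zs ih =>
    intro hz st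
    rw [List.foldl_cons, ih (fun a ha => hz a (List.mem_cons_of_mem z ha))]
    simp only [altStep]
    rw [if_neg (hz z List.mem_cons_self)]

lemma b_noA (n : Int) (s : String) (X Y : Int) (hA : 'A' ∉ s.toList) :
    solve_alt n s X Y = 0 := by
  simp only [solve_alt, PySem.List.len_eq]
  by_cases hm : (s.toList.length : Int) = 0
  · rw [if_pos hm]
  · rw [if_neg hm]
    refine alt_total_const s.toList (s.toList.length : Int) X Y _ ?_ _
    intro a ha
    rw [PySem.List.mem_pyRange_one] at ha
    intro hh
    exact hA (List.mem_of_getElem? ((pyGetD_char_eq s.toList a ha.1 ha.2 'A').mp hh))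

-- ===== VERDICT (by name: the statement is the Claim_ definition above) =====
theorem solve_spec : Claim_equal_solve := by
  intro n s X Y _ hpre
  unfold Spec_solve
  rcases hpre with ⟨hX, hXY⟩ | hA
  · rw [a_eq_spec n s X Y hX hXY, alt_eq_spec n s X Y hX hXY]
  · rw [a_noA n s X Y hA, b_noA n s X Y hA]
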